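-- pv_equiv track=rewrite | github.com/rpp98/Barry | Barry_working.py | tripdivs_message
-- ===== SOURCE A (Python) =====
-- def tripdivs_message(trip_divs):
--     '''Create message to be printed in embed for $tripdiv
--     Parameters:
--         trip_divs;list of strings
--     Returns:
--         tripdiv_message;str
--     '''
--     message = ''
--     for idx in range(len(trip_divs)):
--         coin = trip_divs[idx]
--         if (idx + 1) % 7 == 0 or idx == (len(trip_divs) - 1):
--             message = message + '{}{}\n'.format(coin,(9 - len(coin)) * ' ')
--         else:
--             message = message + '{}{}'.format(coin,(9 - len(coin)) * ' ')
--     if len(message) == 0: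
--         message = 'None'
--     return message
-- ===== SOURCE B (Python) =====
-- def tripdivs_message(trip_divs):
--     '''Create message to be printed in embed for $tripdiv (chunked re-implementation).'''
--     rows = []
--     i = 0
--     while i < len(trip_divs):
--         chunk = trip_divs[i:i + 7]
--         rows.append(''.join(c + ' ' * (9 - len(c)) for c in chunk) + '\n')
--         i += 7
--     return ''.join(rows) or 'None'
-- ===== Notes on version B (the rewrite author's own statement) =====
-- stated objective: faster
-- what changed: Replaces the index loop with its per-index modulo/last-index newline test and repeated string concatenation by a chunking loop that slices 7 coins at a time, builds each row by joining padded coins plus a newline, and joins the rows at the end ('' -> 'None' via or).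
import Mathlib
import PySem

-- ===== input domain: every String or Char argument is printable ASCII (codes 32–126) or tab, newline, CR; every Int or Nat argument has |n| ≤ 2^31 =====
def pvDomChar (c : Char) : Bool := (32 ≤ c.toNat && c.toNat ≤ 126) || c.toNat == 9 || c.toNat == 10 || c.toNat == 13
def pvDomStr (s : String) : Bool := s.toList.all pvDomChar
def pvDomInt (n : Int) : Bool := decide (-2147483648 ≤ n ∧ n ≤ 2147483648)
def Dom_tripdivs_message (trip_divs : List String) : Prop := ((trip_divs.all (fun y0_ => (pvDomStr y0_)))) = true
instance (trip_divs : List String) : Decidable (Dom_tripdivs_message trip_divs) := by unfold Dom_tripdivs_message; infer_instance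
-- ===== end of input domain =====

-- B replaces A's index loop (newline when (idx+1)%7==0 or idx is last) by a chunking loop
-- that slices off 7 coins per row; same return value, no argument is mutated.

-- ===== PORT A =====
-- literal transliteration of A: fold over range(len(trip_divs)), message built as List Char
-- ('{}{}'.format(coin, (9-len(coin))*' ') is coin ++ (9-len(coin))*' '; string repetition is
-- pyRepeat, empty for a negative count exactly as Python)
def tripdivs_message (trip_divs : List String) : String :=
  let message : List Char :=
    (PySem.List.pyRange 0 (PySem.List.len trip_divs) 1).foldl
      (fun message idx =>
        let coin : List Char := (PySem.List.pyGetD trip_divs idx "").toList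
        if PySem.Int.mod (idx + 1) 7 = 0 ∨ idx = PySem.List.len trip_divs - 1 then
          message ++ coin ++ PySem.List.pyRepeat [' '] (9 - coin.length) ++ ['\n']
        else
          message ++ coin ++ PySem.List.pyRepeat [' '] (9 - coin.length)) []
  if message.length = 0 then "None" else String.ofList message

-- ===== PORT B =====
-- coin + ' ' * (9 - len(coin)); Nat subtraction truncates at 0 exactly like Python's
-- negative string repetition giving ''
def pvPadCoin (c : String) : List Char :=
  c.toList ++ List.replicate (9 - c.toList.length) ' '

-- the while loop of Source B: for i = 0, 7, 14, … take the row trip_divs[i:i+7]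
def pvRows (l : List String) (i : Nat) : List (List Char) :=
  if i < l.length then
    (((PySem.List.slice l (some (i:Int)) (some ((i:Int) + 7))).map pvPadCoin).flatten ++ ['\n'])
      :: pvRows l (i + 7)
  else []
termination_by l.length - i

def tripdivs_message_alt (trip_divs : List String) : String :=
  let msg := (pvRows trip_divs 0).flatten
  if msg = [] then "None" else String.ofList msg

-- ===== PRECONDITION & SPEC =====
def Spec_tripdivs_message (trip_divs : List String) (out : String) : Prop := out = tripdivs_message_alt trip_divs
instance (trip_divs : List String) (out : String) : Decidable (Spec_tripdivs_message trip_divs out) := by unfold Spec_tripdivs_message; infer_instance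

-- ===== CLAIM (what is proved, stated in full; the proofs are below) =====
def Claim_equal_tripdivs_message : Prop := ∀ (trip_divs : List String), Dom_tripdivs_message trip_divs → Spec_tripdivs_message trip_divs (tripdivs_message trip_divs)

-- ===== LEMMAS AND PROOFS =====

-- the padded coin A appends at index j
def pvF (l : List String) (idx : Int) : List Char :=
  (PySem.List.pyGetD l idx "").toList ++
    PySem.List.pyRepeat [' '] (9 - ((PySem.List.pyGetD l idx "").toList.length : Int))

lemma pvF_natCast (l : List String) (j : Nat) :
    pvF l (j : Int) = pvPadCoin (l.getD j "") := by
  unfold pvF pvPadCoin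
  simp [PySem.List.pyGetD_natCast, PySem.List.pyRepeat_singleton]

-- generic chunk lemma: a fold over range(a, a+m) whose newline test fires exactly at the
-- last index is the flattened row plus '\n'
lemma pvFoldRow (f : Int → List Char) (P : Int → Prop) [DecidablePred P] :
    ∀ (m : ℕ) (a : ℤ) (acc : List Char), 0 < m →
      (∀ idx, a ≤ idx → idx < a + m → (P idx ↔ idx = a + m - 1)) →
      (PySem.List.pyRange a (a + m) 1).foldl
          (fun acc idx => if P idx then acc ++ f idx ++ ['\n'] else acc ++ f idx) acc
        = acc ++ ((List.range m).map (fun k : ℕ => f (a + (k:ℤ)))).flatten ++ ['\n'] := by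
  intro m
  induction m with
  | zero => omega
  | succ m ih =>
    intro a acc _ hP
    rw [PySem.List.pyRange_one_cons (by omega)]
    by_cases hm : m = 0
    · subst hm
      rw [show a + ((1:ℕ):ℤ) = a + 1 by push_cast; ring]
      rw [PySem.List.pyRange_one_eq_nil (by omega)]
      simp only [List.foldl_cons, List.foldl_nil]
      rw [if_pos ((hP a (le_refl a) (by push_cast; omega)).mpr (by push_cast; omega))]
      simp
    · have h0 : ¬ P a := by
        intro h
        have := (hP a (le_refl a) (by push_cast; omega)).mp h
        push_cast at this; omega
      simp only [List.foldl_cons, if_neg h0]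
      rw [show a + ((m+1:ℕ):ℤ) = (a+1) + (m:ℤ) by push_cast; ring]
      rw [ih (a+1) (acc ++ f a) (by omega)
        (by intro idx h1 h2; rw [hP idx (by omega) (by push_cast; omega)]
            constructor <;> (intro h; push_cast at *; omega))]
      have hr : (List.range (m+1)).map (fun k : ℕ => f (a + (k:ℤ)))
          = f a :: (List.range m).map (fun k : ℕ => f ((a+1) + (k:ℤ))) := by
        rw [List.range_succ_eq_map, List.map_cons, List.map_map]
        congr 1
        · norm_num
        · apply List.map_congr_left
          intro k _
          simp only [Function.comp_apply]
          congr 1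
          push_cast; ring
      rw [hr]
      simp [List.append_assoc]

-- take m (drop a l) written index-wise
lemma pvTakeGetD (l : List String) (a m : ℕ) (h : a + m ≤ l.length) :
    (l.drop a).take m = (List.range m).map (fun k => l.getD (a + k) "") := by
  apply List.ext_getElem
  · simp; omega
  · intro i h1 h2
    simp at h1 ⊢
    rw [List.getElem?_eq_getElem (by omega)]
    rfl

lemma pvRows_stop (l : List String) (i : Nat) (h : l.length ≤ i) : pvRows l i = [] := by
  rw [pvRows, if_neg (by omega)]

lemma pvRows_step (l : List String) (i : Nat) (h : i < l.length) :
    pvRows l i = ((((l.drop i).take 7).map pvPadCoin).flatten ++ ['\n']) :: pvRows l (i + 7) := by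
  rw [pvRows, if_pos h]
  rw [show ((i:ℤ) + 7) = (i:ℤ) + ((7:ℕ):ℤ) by norm_num, PySem.List.slice_natCast_add]

-- main invariant: the tail of A's fold starting at a multiple of 7 is the remaining rows
lemma pvFoldChunks (l : List String) :
    ∀ (fuel i : ℕ) (acc : List Char), l.length - i ≤ fuel → 7 ∣ i →
      (PySem.List.pyRange i (PySem.List.len l) 1).foldl
        (fun message idx =>
          let coin : List Char := (PySem.List.pyGetD l idx "").toList
          if PySem.Int.mod (idx + 1) 7 = 0 ∨ idx = PySem.List.len l - 1 then
            message ++ coin ++ PySem.List.pyRepeat [' '] (9 - coin.length) ++ ['\n']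
          else
            message ++ coin ++ PySem.List.pyRepeat [' '] (9 - coin.length)) acc
      = acc ++ (pvRows l i).flatten := by
  intro fuel
  induction fuel with
  | zero =>
    intro i acc hfuel _
    simp only [PySem.List.len_eq]
    rw [PySem.List.pyRange_one_eq_nil (by omega)]
    simp [pvRows_stop l i (by omega)]
  | succ fuel ih =>
    intro i acc hfuel h7
    by_cases hi : l.length ≤ i
    · simp only [PySem.List.len_eq]
      rw [PySem.List.pyRange_one_eq_nil (by omega)]
      simp [pvRows_stop l i (by omega)]
    · replace hi : i < l.length := by omega
      obtain ⟨m, hm⟩ : ∃ m, m = min (i + 7) l.length - i := ⟨_, rfl⟩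
      have hstep : (fun (message : List Char) (idx : ℤ) =>
          let coin : List Char := (PySem.List.pyGetD l idx "").toList
          if PySem.Int.mod (idx + 1) 7 = 0 ∨ idx = PySem.List.len l - 1 then
            message ++ coin ++ PySem.List.pyRepeat [' '] (9 - coin.length) ++ ['\n']
          else
            message ++ coin ++ PySem.List.pyRepeat [' '] (9 - coin.length))
        = (fun acc idx =>
            if PySem.Int.mod (idx + 1) 7 = 0 ∨ idx = PySem.List.len l - 1 then
              acc ++ pvF l idx ++ ['\n'] else acc ++ pvF l idx) := by
        funext acc idx
        unfold pvF
        split_ifs <;> simp [List.append_assoc]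
      rw [hstep]
      simp only [hstep] at ih
      rw [PySem.List.pyRange_one_append (i:ℤ) ((i:ℤ) + (m:ℤ)) (PySem.List.len l)
        (by omega) (by simp only [PySem.List.len_eq]; omega)]
      rw [List.foldl_append]
      have hcf := pvFoldRow (pvF l)
        (fun idx => PySem.Int.mod (idx + 1) 7 = 0 ∨ idx = PySem.List.len l - 1) m (i:ℤ) acc (by omega)
        (by intro idx hx1 hx2
            simp only [pysem]
            omega)
      beta_reduce at hcf
      rw [hcf]
      have htail : ∀ acc' : List Char,
          (PySem.List.pyRange ((i:ℤ) + (m:ℤ)) (PySem.List.len l) 1).foldl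
            (fun acc idx =>
              if PySem.Int.mod (idx + 1) 7 = 0 ∨ idx = PySem.List.len l - 1 then
                acc ++ pvF l idx ++ ['\n'] else acc ++ pvF l idx) acc'
          = acc' ++ (pvRows l (i + 7)).flatten := by
        intro acc'
        rcases eq_or_lt_of_le (show m ≤ 7 by omega) with h7m | h7m
        · rw [show (i:ℤ) + (m:ℤ) = ((i + 7 : ℕ) : ℤ) by push_cast; omega]
          exact ih (i + 7) acc' (by omega) (by omega)
        · rw [PySem.List.pyRange_one_eq_nil (by simp only [PySem.List.len_eq]; omega)]
          simp [pvRows_stop l (i + 7) (by omega)]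
      rw [htail]
      have htake : (l.drop i).take 7 = (l.drop i).take m := by
        rcases Nat.lt_or_ge l.length (i + 7) with h | h
        · have hlen : (l.drop i).length = l.length - i := by simp
          have hmlen : m = (l.drop i).length := by omega
          rw [List.take_of_length_le (by omega), hmlen, List.take_length]
        · have h7' : m = 7 := by omega
          rw [h7']
      have hrow : (((l.drop i).take 7).map pvPadCoin).flatten
          = ((List.range m).map (fun k : ℕ => pvF l ((i:ℤ) + (k:ℤ)))).flatten := by
        rw [htake, pvTakeGetD l i m (by omega), List.map_map]
        congr 1
        apply List.map_congr_left
        intro k _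
        simp only [Function.comp_apply]
        rw [show (i:ℤ) + (k:ℤ) = ((i + k : ℕ) : ℤ) by push_cast; ring]
        exact (pvF_natCast l (i + k)).symm
      conv_rhs => rw [pvRows_step l i (by omega), List.flatten_cons, hrow]
      simp [List.append_assoc]

theorem pv_main (l : List String) : tripdivs_message l = tripdivs_message_alt l := by
  unfold tripdivs_message tripdivs_message_alt
  have h := pvFoldChunks l l.length 0 [] (by omega) ⟨0, rfl⟩
  simp only [Nat.cast_zero, List.nil_append] at h
  rw [h]
  simp only [List.length_eq_zero_iff]

-- ===== VERDICT (by name: the statement is the Claim_ definition above) =====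
theorem tripdivs_message_spec : Claim_equal_tripdivs_message := by
  intro l _
  unfold Spec_tripdivs_message
  exact pv_main l
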